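-- pv_equiv track=rewrite | github.com/itstanner5216/multi-mcp | src/multimcp/retrieval/routing_tool.py | format_namespace_grouped
-- ===== SOURCE A (Python) =====
-- from collections import defaultdict
--
-- def format_namespace_grouped(
--     tool_ids: list[str],
--     env_namespaces: list[str],
-- ) -> list[str]:
--     """Order tool IDs with env-relevant namespaces first, then alphabetically.
--
--     Groups tool_ids by namespace (prefix before "__").
--     Outputs env_namespaces groups first (each sorted internally),
--     then remaining groups sorted alphabetically.
--
--     Args:
--         tool_ids: List of tool keys in "server__tool" format.
--         env_namespaces: Namespaces to place at the front of the ordering.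
--
--     Returns:
--         Ordered list of tool IDs.
--     """
--     groups: dict[str, list[str]] = defaultdict(list)
--     for tool_id in tool_ids:
--         if "__" in tool_id:
--             ns = tool_id.split("__", 1)[0]
--         else:
--             ns = ""
--         groups[ns].append(tool_id)
--
--     ordered: list[str] = []
--     # Env namespaces first, in declaration order
--     for ns in env_namespaces:
--         if ns in groups:
--             ordered.extend(sorted(groups.pop(ns)))
--
--     # Remaining groups sorted alphabetically by namespace
--     for ns in sorted(groups.keys()):
--         ordered.extend(sorted(groups[ns]))
--
--     return ordered
-- ===== SOURCE B (Python) =====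
-- def format_namespace_grouped(
--     tool_ids: list[str],
--     env_namespaces: list[str],
-- ) -> list[str]:
--     """Order tool IDs via one stable composite-key sort instead of
--     dict grouping, a pop loop and per-group sorts."""
--     env_rank: dict[str, int] = {}
--     for ns in env_namespaces:
--         if ns not in env_rank:
--             env_rank[ns] = len(env_rank)
--     n = len(env_rank)
--
--     def group_key(tool_id: str):
--         ns = tool_id.split("__", 1)[0] if "__" in tool_id else ""
--         r = env_rank.get(ns)
--         return (r, "") if r is not None else (n, ns)
--
--     return sorted(sorted(tool_ids), key=group_key)
-- ===== Notes on version B (the rewrite author's own statement) =====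
-- stated objective: idiomatic
-- what changed: Replaces the dict-of-groups build, the env pop loop and the per-group sorts by an env-rank index plus one global stable sort of the IDs under a composite (rank-or-n, namespace) key on top of a plain pre-sort.
import Mathlib
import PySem

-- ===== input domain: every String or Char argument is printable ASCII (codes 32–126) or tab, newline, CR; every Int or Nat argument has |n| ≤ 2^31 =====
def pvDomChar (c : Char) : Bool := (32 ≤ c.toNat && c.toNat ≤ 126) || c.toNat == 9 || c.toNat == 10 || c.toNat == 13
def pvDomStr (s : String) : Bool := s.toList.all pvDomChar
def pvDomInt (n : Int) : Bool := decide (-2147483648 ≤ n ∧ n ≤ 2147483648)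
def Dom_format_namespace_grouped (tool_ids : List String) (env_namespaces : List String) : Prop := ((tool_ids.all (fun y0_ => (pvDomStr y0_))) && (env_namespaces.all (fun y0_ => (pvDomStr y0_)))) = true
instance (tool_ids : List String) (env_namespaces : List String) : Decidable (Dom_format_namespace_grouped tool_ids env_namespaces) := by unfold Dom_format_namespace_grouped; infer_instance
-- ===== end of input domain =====

-- B replaces A's dict grouping, env pop loop and per-group sorts by one global
-- stable composite-key sort over a plain pre-sort (objective: idiomatic).


-- ===== PORT A =====
-- shared helper: `tool_id.split("__", 1)[0] if "__" in tool_id else ""` (identical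
-- expression in Source A and Source B; split with the non-empty separator "__" always
-- returns a non-empty list, so `[0]` is its head and never raises)
def pvNs (tid : String) : String :=
  if PySem.Str.isIn "__" tid then ((PySem.Str.splitMax? tid "__" 1).getD []).headD ""
  else ""

def format_namespace_grouped (tool_ids : List String) (env_namespaces : List String) : List String :=
  -- groups = defaultdict(list); for tool_id in tool_ids: groups[ns].append(tool_id)
  let groups : PySem.Dict String (List String) :=
    tool_ids.foldl (fun d tid => d.modify (pvNs tid) [] (fun g => g ++ [tid])) PySem.Dict.empty
  -- for ns in env_namespaces: if ns in groups: ordered.extend(sorted(groups.pop(ns)))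
  let st : List String × PySem.Dict String (List String) :=
    env_namespaces.foldl (fun st ns =>
      match st.2.pop? ns with
      | some (grp, rest) => (st.1 ++ PySem.List.sorted grp (fun x => x) false, rest)
      | none => st) ([], groups)
  -- for ns in sorted(groups.keys()): ordered.extend(sorted(groups[ns]))
  (PySem.List.sorted st.2.keys (fun x => x) false).foldl
    (fun out ns => out ++ PySem.List.sorted (st.2.getD ns []) (fun x => x) false) st.1

-- ===== PORT B =====
def format_namespace_grouped_alt (tool_ids : List String) (env_namespaces : List String) : List String :=
  -- env_rank: first-occurrence index of each env namespace
  let env_rank : PySem.Dict String Int :=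
    env_namespaces.foldl (fun d ns => if d.contains ns then d else d.insert ns ((d.size : Nat) : Int)) PySem.Dict.empty
  let n : Int := ((env_rank.size : Nat) : Int)
  -- sorted(sorted(tool_ids), key=group_key) with the tuple key (r, "") / (n, ns)
  PySem.List.sorted2 (PySem.List.sorted tool_ids (fun x => x) false)
    (fun tid => match env_rank.get? (pvNs tid) with | some r => r | none => n)
    (fun tid => match env_rank.get? (pvNs tid) with | some _ => "" | none => pvNs tid) false

-- ===== PRECONDITION & SPEC =====
def Spec_format_namespace_grouped (tool_ids : List String) (env_namespaces : List String) (out : List String) : Prop := out = format_namespace_grouped_alt tool_ids env_namespaces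
instance (tool_ids : List String) (env_namespaces : List String) (out : List String) : Decidable (Spec_format_namespace_grouped tool_ids env_namespaces out) := by unfold Spec_format_namespace_grouped; infer_instance

-- ===== CLAIM (what is proved, stated in full; the proofs are below) =====
def Claim_equal_format_namespace_grouped : Prop := ∀ (tool_ids : List String) (env_namespaces : List String), Dom_format_namespace_grouped tool_ids env_namespaces → Spec_format_namespace_grouped tool_ids env_namespaces (format_namespace_grouped tool_ids env_namespaces)

-- ===== LEMMAS AND PROOFS =====

-- proof-side abbreviations ---------------------------------------------------

def rkDict (env : List String) : PySem.Dict String Int :=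
  env.foldl (fun d ns => if d.contains ns then d else d.insert ns ((d.size : Nat) : Int)) PySem.Dict.empty

def k1F (env : List String) (tid : String) : Int :=
  match (rkDict env).get? (pvNs tid) with | some r => r | none => (((rkDict env).size : Nat) : Int)

def k2F (env : List String) (tid : String) : String :=
  match (rkDict env).get? (pvNs tid) with | some _ => "" | none => pvNs tid

-- full tie-breaking key: ((rank-or-n, ns-or-""), tool_id), lexicographic
def KF (env : List String) (tid : String) : (Int ×ₗ String) ×ₗ String :=
  toLex (toLex (k1F env tid, k2F env tid), tid)

def nsFilter (ti : List String) (c : String) : List String := ti.filter (fun t => pvNs t == c)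

def grpDict (ti : List String) : PySem.Dict String (List String) :=
  ti.foldl (fun d tid => d.modify (pvNs tid) [] (fun g => g ++ [tid])) PySem.Dict.empty

def envStep (st : List String × PySem.Dict String (List String)) (ns : String) :
    List String × PySem.Dict String (List String) :=
  match st.2.pop? ns with
  | some (grp, rest) => (st.1 ++ PySem.List.sorted grp (fun x => x) false, rest)
  | none => st

def EnvInv (ti env pre : List String) (st : List String × PySem.Dict String (List String)) : Prop :=
  st.2.keys.Nodup ∧
  (∀ c ∈ st.2.keys, st.2.getD c [] = nsFilter ti c) ∧
  (∀ c ∈ st.2.keys, c ∉ pre) ∧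
  st.1.Pairwise (fun a b => KF env a ≤ KF env b) ∧
  (∀ x ∈ st.1, ∀ t : String, pvNs t ∈ st.2.keys → KF env x < KF env t) ∧
  st.1.Perm (ti.filter (fun t => !(st.2.contains (pvNs t))))

-- dict erase facts -----------------------------------------------------------

theorem erase_keys {ν : Type} (d : PySem.Dict String ν) (k : String) :
    (d.erase k).keys = d.keys.filter (fun c => !(c == k)) := by
  simp only [PySem.Dict.erase, PySem.Dict.keys]
  induction d.items with
  | nil => rfl
  | cons p t ih =>
      by_cases h1 : p.1 = k <;> simp only [List.filter_cons, List.map_cons, h1] <;> simp [ih, h1]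


theorem erase_get? {ν : Type} (d : PySem.Dict String ν) (k c : String) :
    (d.erase k).get? c = if c = k then none else d.get? c := by
  simp only [PySem.Dict.erase, PySem.Dict.get?]
  induction d.items with
  | nil => simp
  | cons p t ih =>
      by_cases h1 : p.1 = k <;> by_cases h2 : p.1 = c <;> simp_all


theorem contains_erase {ν : Type} (d : PySem.Dict String ν) (k c : String) :
    (d.erase k).contains c = if c = k then false else d.contains c := by
  rw [PySem.Dict.contains_eq_isSome_get?, PySem.Dict.contains_eq_isSome_get?, erase_get?]
  by_cases h : c = k <;> simp [h]

theorem ofList_append (l : List String) (x : String) :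
    PySem.Set.ofList (l ++ [x]) = PySem.Set.add (PySem.Set.ofList l) x := by
  simp [PySem.Set.ofList_eq_foldl, List.foldl_append]


theorem update_suffix (l : List String) (s : PySem.Set String) :
    ∃ t, PySem.Set.update s l = s ++ t := by
  induction l generalizing s with
  | nil => exact ⟨[], by simp [PySem.Set.update]⟩
  | cons x xs ih =>
      have h1 : PySem.Set.update s (x :: xs) = PySem.Set.update (PySem.Set.add s x) xs := by
        simp [PySem.Set.update]
      obtain ⟨t, ht⟩ := ih (PySem.Set.add s x)
      by_cases hc : x ∈ s
      · exact ⟨t, by rw [h1, ht]; simp [PySem.Set.add, hc]⟩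
      · exact ⟨[x] ++ t, by rw [h1, ht]; simp [PySem.Set.add, hc]⟩


theorem rk_char (env : List String) :
    ((rkDict env).size = (PySem.Set.ofList env).length) ∧
    ∀ ns, (rkDict env).get? ns =
      if ns ∈ PySem.Set.ofList env then some (((PySem.Set.ofList env).idxOf ns : Nat) : Int) else none := by
  induction env using List.reverseRecOn with
  | nil => constructor <;> simp [rkDict, PySem.Set.ofList]
  | append_singleton l x ih =>
      obtain ⟨ihs, ihg⟩ := ih
      have hstep : rkDict (l ++ [x]) =
          (if (rkDict l).contains x then rkDict l
           else (rkDict l).insert x (((rkDict l).size : Nat) : Int)) := by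
        simp [rkDict, List.foldl_append]
      have hcont : (rkDict l).contains x = decide (x ∈ PySem.Set.ofList l) := by
        rw [PySem.Dict.contains_eq_isSome_get?, ihg x]
        by_cases hx : x ∈ PySem.Set.ofList l <;> simp [hx]
      rw [ofList_append]
      by_cases hx : x ∈ PySem.Set.ofList l
      · have hsame : PySem.Set.add (PySem.Set.ofList l) x = PySem.Set.ofList l := by
          simp [PySem.Set.add, hx]
        rw [hsame, hstep, hcont, if_pos (by simp [hx])]
        exact ⟨ihs, ihg⟩
      · have hadd : PySem.Set.add (PySem.Set.ofList l) x = PySem.Set.ofList l ++ [x] := by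
          simp [PySem.Set.add, hx]
        rw [hadd, hstep, hcont, if_neg (by simp [hx])]
        constructor
        · rw [PySem.Dict.size_insert]
          simp [hcont, hx, ihs]
        · intro ns
          by_cases hns : ns = x
          · subst hns
            rw [PySem.Dict.get?_insert_self]
            simp [List.idxOf_append_of_notMem hx, ihs]
          · rw [PySem.Dict.get?_insert_of_ne (hne := hns), ihg ns]
            by_cases hmem : ns ∈ PySem.Set.ofList l
            · simp [hmem, List.idxOf_append_of_mem hmem]
            · have hno : ns ∉ PySem.Set.ofList l ++ [x] := by simp [hmem, hns]
              simp [hmem, hno]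


theorem rank_none_iff (env : List String) (ns : String) :
    (rkDict env).get? ns = none ↔ ns ∉ env := by
  rw [(rk_char env).2 ns]
  by_cases h : ns ∈ PySem.Set.ofList env <;> simp_all [PySem.Set.mem_ofList]


theorem rank_lt_size {env : List String} {ns : String} {r : Int}
    (h : (rkDict env).get? ns = some r) : r < (((rkDict env).size : Nat) : Int) := by
  rw [(rk_char env).2 ns] at h
  by_cases hm : ns ∈ PySem.Set.ofList env
  · simp only [hm, if_true, Option.some.injEq] at h
    have := List.idxOf_lt_length_of_mem hm
    rw [(rk_char env).1]
    omega
  · simp [hm] at h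

theorem rank_lt {pre tail : List String} {h ns' : String} {r r' : Int}
    (hh : h ∉ pre) (h1 : ns' ∉ pre) (h2 : ns' ≠ h)
    (hr : (rkDict (pre ++ h :: tail)).get? h = some r)
    (hr' : (rkDict (pre ++ h :: tail)).get? ns' = some r') : r < r' := by
  set env := pre ++ h :: tail with henv
  have hS : ∃ t, PySem.Set.ofList env = (PySem.Set.ofList pre ++ [h]) ++ t := by
    have e1 : PySem.Set.ofList env = PySem.Set.update (PySem.Set.add (PySem.Set.ofList pre) h) tail := by
      simp [henv, PySem.Set.ofList_eq_foldl, List.foldl_append, PySem.Set.update]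
    have e2 : PySem.Set.add (PySem.Set.ofList pre) h = PySem.Set.ofList pre ++ [h] := by
      simp [PySem.Set.add, PySem.Set.mem_ofList, hh]
    obtain ⟨t, ht⟩ := update_suffix tail (PySem.Set.add (PySem.Set.ofList pre) h)
    exact ⟨t, by rw [e1, ht, e2]⟩
  obtain ⟨t, ht⟩ := hS
  rw [(rk_char env).2] at hr hr'
  have hpre_h : h ∉ PySem.Set.ofList pre := by simpa [PySem.Set.mem_ofList] using hh
  have hpre_ns : ns' ∉ PySem.Set.ofList pre ++ [h] := by
    simp [PySem.Set.mem_ofList, h1, h2]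
  by_cases hm : h ∈ PySem.Set.ofList env
  · by_cases hm' : ns' ∈ PySem.Set.ofList env
    · simp only [hm, hm', if_true, Option.some.injEq] at hr hr'
      subst hr hr'
      rw [ht, List.idxOf_append_of_mem (by simp [hpre_h]), List.idxOf_append_of_notMem hpre_h,
        List.idxOf_append_of_notMem hpre_ns]
      simp
      omega
    · simp [hm'] at hr'
  · simp [hm] at hr

theorem grp_getD (ti : List String) (c : String) :
    (grpDict ti).getD c [] = nsFilter ti c := by
  have h1 : grpDict ti =
      (ti.map (fun t => (pvNs t, t))).foldl (fun d p => d.modify p.1 [] (fun g => g ++ [p.2])) PySem.Dict.empty := by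
    rw [List.foldl_map]; rfl
  rw [nsFilter, h1, PySem.Dict.getD_foldl_modify_append]
  simp [List.filter_map, Function.comp_def]


theorem grp_keys (ti : List String) :
    (grpDict ti).keys = PySem.Set.ofList (ti.map pvNs) := by
  rw [grpDict, PySem.Dict.keys_foldl_modify_key (key := pvNs)]
  simp [PySem.Set.update, PySem.Set.ofList_eq_foldl, PySem.Dict.keys_empty]


theorem grp_nodup (ti : List String) : (grpDict ti).keys.Nodup := by
  rw [grpDict]
  exact PySem.Dict.nodup_keys_foldl_modify_key ti pvNs [] (fun d x g => g ++ [x]) PySem.Dict.empty (by simp)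


theorem KF_inj (env : List String) : Function.Injective (KF env) := by
  intro a b h
  have := congrArg (fun z => (ofLex z).2) h
  simpa [KF] using this

theorem KF_le_of_same_group {env : List String} {a b : String}
    (h : k1F env a = k1F env b) (h2 : k2F env a = k2F env b) (hab : a ≤ b) :
    KF env a ≤ KF env b := by
  simp [KF, Prod.Lex.le_iff, h, h2, hab]


theorem KF_lt_of_k1_lt {env : List String} {a b : String}
    (h : k1F env a < k1F env b) : KF env a < KF env b := by
  simp [KF, Prod.Lex.lt_iff, h]


theorem KF_lt_of_k2_lt {env : List String} {a b : String}
    (h : k1F env a = k1F env b) (h2 : k2F env a < k2F env b) : KF env a < KF env b := by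
  simp [KF, Prod.Lex.lt_iff, h, h2]


theorem k1F_some {env : List String} {t : String} {r : Int}
    (h : (rkDict env).get? (pvNs t) = some r) : k1F env t = r := by
  simp [k1F, h]

theorem k1F_none {env : List String} {t : String}
    (h : (rkDict env).get? (pvNs t) = none) : k1F env t = (((rkDict env).size : Nat) : Int) := by
  simp [k1F, h]

theorem k2F_some {env : List String} {t : String} {r : Int}
    (h : (rkDict env).get? (pvNs t) = some r) : k2F env t = "" := by
  simp [k2F, h]

theorem k2F_none {env : List String} {t : String}
    (h : (rkDict env).get? (pvNs t) = none) : k2F env t = pvNs t := by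
  simp [k2F, h]

theorem mem_nsFilter {ti : List String} {c t : String} (h : t ∈ nsFilter ti c) :
    t ∈ ti ∧ pvNs t = c := by
  simpa [nsFilter] using List.mem_filter.mp h


theorem flatten_nsFilter (ti : List String) (ks : List String) (hnd : ks.Nodup) :
    (ks.map (fun c => nsFilter ti c)).flatten.Perm
      (ti.filter (fun t => ks.contains (pvNs t))) := by
  induction ks with
  | nil => simp
  | cons c ks ih =>
      simp only [List.map_cons, List.flatten_cons]
      have hnd' := hnd.of_cons
      have hc : c ∉ ks := by simp at hnd; exact hnd.1
      have h1 := ih hnd'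
      have split := List.filter_append_perm (fun t => pvNs t == c)
        (ti.filter (fun t => (c :: ks).contains (pvNs t)))
      rw [List.filter_filter, List.filter_filter] at split
      have e1 : ti.filter (fun t => (pvNs t == c) && (c :: ks).contains (pvNs t)) = nsFilter ti c := by
        rw [nsFilter]; apply List.filter_congr; intro t _
        by_cases h : pvNs t = c <;> simp [h]
      have e2 : ti.filter (fun t => !(pvNs t == c) && (c :: ks).contains (pvNs t)) =
          ti.filter (fun t => ks.contains (pvNs t)) := by
        apply List.filter_congr; intro t _
        by_cases h : pvNs t = c
        · simp [h, hc]
        · simp [h]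
      rw [e1, e2] at split
      exact (List.Perm.append_left _ h1).trans split


theorem filter_erase_perm (ti : List String) (g : PySem.Dict String (List String))
    (h : String) (hmem : g.contains h = true) :
    (ti.filter (fun t => !((g.erase h).contains (pvNs t)))).Perm
      ((ti.filter (fun t => !(g.contains (pvNs t)))) ++ nsFilter ti h) := by
  have split := List.filter_append_perm (fun t => pvNs t == h)
    (ti.filter (fun t => !((g.erase h).contains (pvNs t))))
  rw [List.filter_filter, List.filter_filter] at split
  have e1 : ti.filter (fun t => (pvNs t == h) && !((g.erase h).contains (pvNs t))) = nsFilter ti h := by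
    rw [nsFilter]; apply List.filter_congr; intro t _
    by_cases hh : pvNs t = h <;> simp [hh, contains_erase]
  have e2 : ti.filter (fun t => !(pvNs t == h) && !((g.erase h).contains (pvNs t))) =
      ti.filter (fun t => !(g.contains (pvNs t))) := by
    apply List.filter_congr; intro t _
    by_cases hh : pvNs t = h <;> simp [hh, contains_erase, hmem]
  rw [e1, e2] at split
  exact split.symm.trans (List.perm_append_comm)


theorem env_init (ti env : List String) : EnvInv ti env [] ([], grpDict ti) := by
  refine ⟨grp_nodup ti, fun c _ => grp_getD ti c, by simp, List.Pairwise.nil, by simp, ?_⟩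
  have hfil : ti.filter (fun t => !((grpDict ti).contains (pvNs t))) = [] := by
    rw [List.filter_eq_nil_iff]
    intro t ht
    have : pvNs t ∈ (grpDict ti).keys := by
      rw [grp_keys, PySem.Set.mem_ofList]
      exact List.mem_map_of_mem ht
    rw [(PySem.Dict.contains_iff_mem_keys _ _).mpr this]
    simp
  rw [hfil]


theorem env_step_inv {ti env pre tail : List String} {ns : String}
    {st : List String × PySem.Dict String (List String)}
    (henv : env = pre ++ ns :: tail) (hinv : EnvInv ti env pre st) :
    EnvInv ti env (pre ++ [ns]) (envStep st ns) := by
  obtain ⟨hnd, hgetD, hpre, hpw, hbound, hperm⟩ := hinv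
  rcases hc : st.2.get? ns with _ | grp
  · -- ns not present: state unchanged
    have hstep : envStep st ns = st := by simp [envStep, PySem.Dict.pop?, hc]
    rw [hstep]
    have hns_not : ns ∉ st.2.keys := (PySem.Dict.get?_eq_none_iff_not_mem_keys _ _).mp hc
    refine ⟨hnd, hgetD, ?_, hpw, hbound, hperm⟩
    intro c hcm
    have h1 := hpre c hcm
    have h2 : c ≠ ns := fun h => hns_not (h ▸ hcm)
    simp [h1, h2]
  · -- pop ns
    have hstep : envStep st ns = (st.1 ++ PySem.List.sorted grp (fun x => x) false, st.2.erase ns) := by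
      simp [envStep, PySem.Dict.pop?, hc]
    rw [hstep]
    have hns_keys : ns ∈ st.2.keys := by
      by_contra hno
      rw [(PySem.Dict.get?_eq_none_iff_not_mem_keys _ _).mpr hno] at hc
      simp at hc
    have hcont : st.2.contains ns = true := by
      rw [PySem.Dict.contains_eq_isSome_get?, hc]; rfl
    have hgrp : grp = nsFilter ti ns := by
      have := hgetD ns hns_keys
      rwa [PySem.Dict.getD_eq_get?_getD, hc, Option.getD_some] at this
    have hns_env : ns ∈ env := by rw [henv]; simp
    obtain ⟨r, hr⟩ : ∃ r, (rkDict env).get? ns = some r := by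
      rcases hq : (rkDict env).get? ns with _ | r
      · exact absurd ((rank_none_iff env ns).mp hq) (by simp [hns_env])
      · exact ⟨r, rfl⟩
    have hmem_sorted : ∀ x ∈ PySem.List.sorted grp (fun x => x) false, x ∈ ti ∧ pvNs x = ns := by
      intro x hx
      exact mem_nsFilter (hgrp ▸ (PySem.List.mem_sorted _ _ _ _).mp hx)
    have hkeys' : ∀ c, c ∈ (st.2.erase ns).keys → c ∈ st.2.keys ∧ c ≠ ns := by
      intro c hcm
      rw [erase_keys] at hcm
      have := List.mem_filter.mp hcm
      refine ⟨this.1, by simpa using this.2⟩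
    -- strict bound from a popped element to anything still grouped
    have hnew_bound : ∀ x ∈ PySem.List.sorted grp (fun x => x) false,
        ∀ t : String, pvNs t ∈ (st.2.erase ns).keys → KF env x < KF env t := by
      intro x hx t htm
      obtain ⟨hc1, hc2⟩ := hkeys' _ htm
      have hxns := (hmem_sorted x hx).2
      have hxr : (rkDict env).get? (pvNs x) = some r := by rw [hxns]; exact hr
      rcases hq : (rkDict env).get? (pvNs t) with _ | r'
      · exact KF_lt_of_k1_lt (by rw [k1F_some hxr, k1F_none hq]; exact rank_lt_size hr)
      · have hr2 : (rkDict (pre ++ ns :: tail)).get? ns = some r := by rw [← henv]; exact hr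
        have hq2 : (rkDict (pre ++ ns :: tail)).get? (pvNs t) = some r' := by rw [← henv]; exact hq
        exact KF_lt_of_k1_lt (by
          rw [k1F_some hxr, k1F_some hq]
          exact rank_lt (hpre ns hns_keys) (hpre _ hc1) hc2 hr2 hq2)
    refine ⟨?_, ?_, ?_, ?_, ?_, ?_⟩
    · rw [erase_keys]; exact hnd.filter _
    · intro c hcm
      obtain ⟨hc1, hc2⟩ := hkeys' c hcm
      rw [PySem.Dict.getD_eq_get?_getD, erase_get?, if_neg hc2, ← PySem.Dict.getD_eq_get?_getD]
      exact hgetD c hc1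
    · intro c hcm
      obtain ⟨hc1, hc2⟩ := hkeys' c hcm
      have := hpre c hc1
      simp [this, hc2]
    · rw [List.pairwise_append]
      refine ⟨hpw, ?_, ?_⟩
      · have hsp := PySem.List.sorted_pairwise grp (fun x => x)
        refine hsp.imp_of_mem ?_
        intro a b ha hb hab
        have hra : (rkDict env).get? (pvNs a) = some r := by rw [(hmem_sorted a ha).2]; exact hr
        have hrb : (rkDict env).get? (pvNs b) = some r := by rw [(hmem_sorted b hb).2]; exact hr
        exact KF_le_of_same_group (by rw [k1F_some hra, k1F_some hrb])
          (by rw [k2F_some hra, k2F_some hrb]) hab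
      · intro a ha b hb
        exact le_of_lt (hbound a ha b (by rw [(hmem_sorted b hb).2]; exact hns_keys))
    · intro x hx t htm
      rcases List.mem_append.mp hx with hx1 | hx2
      · exact hbound x hx1 t ((hkeys' _ htm).1)
      · exact hnew_bound x hx2 t htm
    · have h1 : (st.1 ++ PySem.List.sorted grp (fun x => x) false).Perm
          (ti.filter (fun t => !(st.2.contains (pvNs t))) ++ nsFilter ti ns) :=
        hperm.append ((PySem.List.sorted_perm grp (fun x => x) false).trans (by rw [hgrp]))
      exact h1.trans (filter_erase_perm ti st.2 ns hcont).symm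


theorem env_loop (ti env : List String) :
    ∀ (rest pre : List String) (st : List String × PySem.Dict String (List String)),
      env = pre ++ rest → EnvInv ti env pre st → EnvInv ti env (pre ++ rest) (rest.foldl envStep st) := by
  intro rest
  induction rest with
  | nil => intro pre st h hinv; simpa using hinv
  | cons ns tail ih =>
      intro pre st h hinv
      have h2 : env = (pre ++ [ns]) ++ tail := by simpa using h
      have := ih (pre ++ [ns]) (envStep st ns) h2 (env_step_inv h hinv)
      simpa using this

-- tail loop ------------------------------------------------------------------

theorem tail_pairwise (ti env : List String) :
    ∀ (ks out : List String), ks.Pairwise (· < ·) → (∀ c ∈ ks, c ∉ env) →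
      out.Pairwise (fun a b => KF env a ≤ KF env b) →
      (∀ x ∈ out, ∀ c ∈ ks, ∀ t : String, pvNs t = c → KF env x < KF env t) →
      (ks.foldl (fun out c => out ++ PySem.List.sorted (nsFilter ti c) (fun x => x) false) out).Pairwise
        (fun a b => KF env a ≤ KF env b) := by
  intro ks
  induction ks with
  | nil => intro out _ _ hpw _; simpa using hpw
  | cons cc ks ih =>
      intro out hlt hunr hpw hbound
      simp only [List.foldl_cons]
      have hcc_unr : cc ∉ env := hunr cc (by simp)
      have hcc_none : ∀ t : String, pvNs t = cc → (rkDict env).get? (pvNs t) = none := by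
        intro t ht; rw [ht]; exact (rank_none_iff env cc).mpr hcc_unr
      have hmemg : ∀ x ∈ PySem.List.sorted (nsFilter ti cc) (fun x => x) false, pvNs x = cc := by
        intro x hx
        exact (mem_nsFilter ((PySem.List.mem_sorted _ _ _ _).mp hx)).2
      refine ih (out ++ PySem.List.sorted (nsFilter ti cc) (fun x => x) false)
        hlt.of_cons (fun c hc => hunr c (by simp [hc])) ?_ ?_
      · rw [List.pairwise_append]
        refine ⟨hpw, ?_, ?_⟩
        · refine (PySem.List.sorted_pairwise (nsFilter ti cc) (fun x => x)).imp_of_mem ?_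
          intro a b ha hb hab
          have hna := hcc_none a (hmemg a ha)
          have hnb := hcc_none b (hmemg b hb)
          refine KF_le_of_same_group ?_ ?_ hab
          · rw [k1F_none hna, k1F_none hnb]
          · rw [k2F_none hna, k2F_none hnb, hmemg a ha, hmemg b hb]
        · intro a ha b hb
          exact le_of_lt (hbound a ha cc (by simp) b (hmemg b hb))
      · intro x hx c hc t ht
        rcases List.mem_append.mp hx with hx1 | hx2
        · exact hbound x hx1 c (by simp [hc]) t ht
        · have hnx := hcc_none x (hmemg x hx2)
          have hcu : c ∉ env := hunr c (by simp [hc])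
          have hnt : (rkDict env).get? (pvNs t) = none := by
            rw [ht]; exact (rank_none_iff env c).mpr hcu
          refine KF_lt_of_k2_lt ?_ ?_
          · rw [k1F_none hnx, k1F_none hnt]
          · rw [k2F_none hnx, k2F_none hnt, hmemg x hx2, ht]
            rcases hlt with _ | ⟨hh, _⟩
            exact hh c hc

-- stability of B's sort ------------------------------------------------------

theorem insertBy_stable {κ : Type} [LinearOrder κ] (key : String → κ)
    (x : String) (acc : List String)
    (hp : acc.Pairwise (fun a b => key a < key b ∨ (key a = key b ∧ a ≤ b)))
    (hle : ∀ b ∈ acc, b ≤ x) :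
    (PySem.List.insertBy (fun a b => decide (key a < key b)) x acc).Pairwise
      (fun a b => key a < key b ∨ (key a = key b ∧ a ≤ b)) := by
  induction acc with
  | nil => simp [PySem.List.insertBy]
  | cons y ys ih =>
      rw [List.pairwise_cons] at hp
      by_cases hxy : key x < key y
      · simp only [PySem.List.insertBy, hxy, decide_true, if_true]
        refine List.Pairwise.cons ?_ (List.Pairwise.cons hp.1 hp.2)
        intro b hb
        rcases List.mem_cons.mp hb with hby | hb2
        · subst hby; exact Or.inl hxy
        · rcases hp.1 b hb2 with hlt | ⟨heq, _⟩
          · exact Or.inl (hxy.trans hlt)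
          · exact Or.inl (heq ▸ hxy)
      · simp only [PySem.List.insertBy, hxy, decide_false]
        refine List.Pairwise.cons ?_ (ih hp.2 (fun b hb => hle b (by simp [hb])))
        intro b hb
        rcases (PySem.List.mem_insertBy _ _ _ _).mp hb with hbx | hbm
        · subst hbx
          rcases lt_or_eq_of_le (not_lt.mp hxy) with hlt | heq
          · exact Or.inl hlt
          · exact Or.inr ⟨heq, hle y (by simp)⟩
        · exact hp.1 b hbm

theorem sorted_stable {κ : Type} [LinearOrder κ] (key : String → κ) (X : List String)
    (h : X.Pairwise (· ≤ ·)) :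
    (PySem.List.sorted X key false).Pairwise
      (fun a b => key a < key b ∨ (key a = key b ∧ a ≤ b)) := by
  rw [PySem.List.sorted_eq_foldl_insertBy]
  suffices hgen : ∀ (X : List String) (acc : List String),
      X.Pairwise (· ≤ ·) →
      acc.Pairwise (fun a b => key a < key b ∨ (key a = key b ∧ a ≤ b)) →
      (∀ b ∈ acc, ∀ x ∈ X, b ≤ x) →
      (X.foldl (fun acc x => PySem.List.insertBy (fun a b => decide (key a < key b)) x acc) acc).Pairwise
        (fun a b => key a < key b ∨ (key a = key b ∧ a ≤ b)) by
    exact hgen X [] h List.Pairwise.nil (by simp)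
  intro X
  induction X with
  | nil => intro acc _ hacc _; simpa using hacc
  | cons x xs ih =>
      intro acc hX hacc hfut
      simp only [List.foldl_cons]
      rw [List.pairwise_cons] at hX
      refine ih _ hX.2 (insertBy_stable key x acc hacc (fun b hb => hfut b hb x (by simp))) ?_
      intro b hb z hz
      rcases (PySem.List.mem_insertBy _ _ _ _).mp hb with hbx | hbm
      · exact hbx ▸ hX.1 z hz
      · exact hfut b hbm z (by simp [hz])

theorem sorted2_eq_sorted_lex {κ₁ κ₂ : Type} [LinearOrder κ₁] [LinearOrder κ₂]
    (xs : List String) (k1 : String → κ₁) (k2 : String → κ₂) :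
    PySem.List.sorted2 xs k1 k2 false =
      PySem.List.sorted xs (fun t => toLex (k1 t, k2 t)) false := by
  rw [PySem.List.sorted_eq_foldl_insertBy]
  unfold PySem.List.sorted2
  have hbef : (fun a b => decide (k1 a < k1 b) || (!decide (k1 b < k1 a) && decide (k2 a < k2 b))) =
      (fun a b => decide ((fun t => toLex (k1 t, k2 t)) a < (fun t => toLex (k1 t, k2 t)) b)) := by
    funext a b
    rcases lt_trichotomy (k1 a) (k1 b) with h | h | h
    · simp [h, Prod.Lex.lt_iff, not_lt.mpr (le_of_lt h)]
    · simp [h, Prod.Lex.lt_iff]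
    · simp [h, Prod.Lex.lt_iff, not_lt.mpr (le_of_lt h), ne_of_gt h]
  simp only [if_neg (by decide : ¬(false = true))]
  rw [hbef]

theorem B_eq (ti env : List String) :
    format_namespace_grouped_alt ti env =
      PySem.List.sorted (PySem.List.sorted ti (fun x => x) false)
        (fun t => toLex (k1F env t, k2F env t)) false := by
  have : format_namespace_grouped_alt ti env =
      PySem.List.sorted2 (PySem.List.sorted ti (fun x => x) false) (k1F env) (k2F env) false := rfl
  rw [this, sorted2_eq_sorted_lex]

theorem B_pairwise (ti env : List String) :
    (format_namespace_grouped_alt ti env).Pairwise (fun a b => KF env a ≤ KF env b) := by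
  rw [B_eq]
  have hX : (PySem.List.sorted ti (fun x => x) false).Pairwise (· ≤ ·) :=
    PySem.List.sorted_pairwise ti (fun x => x)
  refine (sorted_stable (fun t => toLex (k1F env t, k2F env t)) _ hX).imp ?_
  intro a b h
  simp only [KF, Prod.Lex.le_iff, ofLex_toLex]
  exact h

theorem B_perm (ti env : List String) : (format_namespace_grouped_alt ti env).Perm ti := by
  rw [B_eq]
  exact (PySem.List.sorted_perm _ _ _).trans (PySem.List.sorted_perm _ _ _)

-- A characterization ---------------------------------------------------------

theorem env_final (ti env : List String) :
    EnvInv ti env env (env.foldl envStep ([], grpDict ti)) := by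
  have h := env_loop ti env env [] ([], grpDict ti) (by simp) (env_init ti env)
  simpa using h

theorem A_eq (ti env : List String) :
    format_namespace_grouped ti env =
      (PySem.List.sorted (env.foldl envStep ([], grpDict ti)).2.keys (fun x => x) false).foldl
        (fun out ns => out ++ PySem.List.sorted ((env.foldl envStep ([], grpDict ti)).2.getD ns []) (fun x => x) false)
        (env.foldl envStep ([], grpDict ti)).1 := by
  rfl

theorem A_pairwise (ti env : List String) :
    (format_namespace_grouped ti env).Pairwise (fun a b => KF env a ≤ KF env b) := by
  obtain ⟨hnd, hgetD, hpre, hpw, hbound, hperm⟩ := env_final ti env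
  set stF := env.foldl envStep ([], grpDict ti) with hstF
  rw [A_eq]
  set ks := PySem.List.sorted stF.2.keys (fun x => x) false with hks
  have hks_mem : ∀ c ∈ ks, c ∈ stF.2.keys := fun c hc => (PySem.List.mem_sorted _ _ _ _).mp hc
  have hcongr : ks.foldl (fun out ns => out ++ PySem.List.sorted (stF.2.getD ns []) (fun x => x) false) stF.1 =
      ks.foldl (fun out c => out ++ PySem.List.sorted (nsFilter ti c) (fun x => x) false) stF.1 := by
    apply PySem.List.foldl_congr_mem
    intro acc x hx
    rw [hgetD x (hks_mem x hx)]
  rw [hcongr]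
  have hks_nodup : ks.Nodup := ((PySem.List.sorted_perm _ _ _).nodup_iff).mpr hnd
  have hks_lt : ks.Pairwise (· < ·) := by
    have h1 : ks.Pairwise (· ≤ ·) := PySem.List.sorted_pairwise _ _
    exact (h1.and hks_nodup).imp (fun h => lt_of_le_of_ne h.1 h.2)
  refine tail_pairwise ti env ks stF.1 hks_lt ?_ hpw ?_
  · intro c hc
    exact fun hmem => hpre c (hks_mem c hc) (by simpa using hmem)
  · intro x hx c hc t ht
    exact hbound x hx t (ht ▸ hks_mem c hc)

theorem A_perm (ti env : List String) : (format_namespace_grouped ti env).Perm ti := by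
  obtain ⟨hnd, hgetD, hpre, hpw, hbound, hperm⟩ := env_final ti env
  set stF := env.foldl envStep ([], grpDict ti) with hstF
  rw [A_eq]
  set ks := PySem.List.sorted stF.2.keys (fun x => x) false with hks
  have hks_mem : ∀ c ∈ ks, c ∈ stF.2.keys := fun c hc => (PySem.List.mem_sorted _ _ _ _).mp hc
  have hks_mem' : ∀ c ∈ stF.2.keys, c ∈ ks := fun c hc => (PySem.List.mem_sorted _ _ _ _).mpr hc
  have hcongr : ks.foldl (fun out ns => out ++ PySem.List.sorted (stF.2.getD ns []) (fun x => x) false) stF.1 =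
      ks.foldl (fun out c => out ++ PySem.List.sorted (nsFilter ti c) (fun x => x) false) stF.1 := by
    apply PySem.List.foldl_congr_mem
    intro acc x hx
    rw [hgetD x (hks_mem x hx)]
  rw [hcongr, PySem.List.foldl_append_eq_flatMap]
  have hks_nodup : ks.Nodup := ((PySem.List.sorted_perm _ _ _).nodup_iff).mpr hnd
  have h1 : (ks.flatMap (fun c => PySem.List.sorted (nsFilter ti c) (fun x => x) false)).Perm
      ((ks.map (fun c => nsFilter ti c)).flatten) := by
    rw [List.flatMap_def]
    induction ks with
    | nil => simp
    | cons cc l ih =>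
        simp only [List.map_cons, List.flatten_cons]
        exact (PySem.List.sorted_perm _ _ _).append ih
  have h2 := flatten_nsFilter ti ks hks_nodup
  have h3 : ti.filter (fun t => ks.contains (pvNs t)) = ti.filter (fun t => stF.2.contains (pvNs t)) := by
    apply List.filter_congr
    intro t _
    by_cases hm : pvNs t ∈ stF.2.keys
    · rw [(PySem.Dict.contains_iff_mem_keys _ _).mpr hm]
      simp [hks_mem' _ hm]
    · have : stF.2.contains (pvNs t) = false := by
        rcases hcon : stF.2.contains (pvNs t) with _ | _
        · rfl
        · exact absurd ((PySem.Dict.contains_iff_mem_keys _ _).mp hcon) hm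
      rw [this]
      simp
      intro hmem
      exact absurd (hks_mem _ hmem) hm
  have hfin : (stF.1 ++ ks.flatMap (fun c => PySem.List.sorted (nsFilter ti c) (fun x => x) false)).Perm
      (ti.filter (fun t => !(stF.2.contains (pvNs t))) ++ ti.filter (fun t => stF.2.contains (pvNs t))) := by
    refine List.Perm.append hperm ?_
    rw [← h3]
    exact h1.trans h2
  refine hfin.trans ?_
  refine (List.perm_append_comm).trans ?_
  exact List.filter_append_perm _ ti

-- ===== VERDICT (by name: the statement is the Claim_ definition above) =====
theorem format_namespace_grouped_spec : Claim_equal_format_namespace_grouped := by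
  intro ti env _
  unfold Spec_format_namespace_grouped
  exact PySem.List.eq_of_perm_of_pairwise_le_of_injective (KF env) (KF_inj env)
    ((A_perm ti env).trans (B_perm ti env).symm) (A_pairwise ti env) (B_pairwise ti env)
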